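-- pv_equiv track=rewrite | github.com/JuliaKopalkina/HomeWork3Python | lesson3/Task5.py | ReverseFib
-- ===== SOURCE A (Python) =====
-- def ReverseFib (lst):
--     NewList = []
--     for i in range(len(lst)):
--         if i%2==0:
--             NewList.append(lst[i]*(-1))
--         else:
--             NewList.append(lst[i])
--     return NewList
-- ===== SOURCE B (Python) =====
-- def ReverseFib(lst):
--     out = []
--     i = 0
--     while i + 1 < len(lst):
--         out += [lst[i] * (-1), lst[i + 1]]
--         i += 2
--     return out + [x * (-1) for x in lst[i:]]
-- ===== Notes on version B (the rewrite author's own statement) =====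
-- stated objective: alternative
-- what changed: Replaces the per-index loop with an i%2 parity branch by a stride-2 pairwise traversal (negate first of each pair, keep the second, handle a trailing odd element separately), so no parity test is performed; ported as two-at-a-time structural recursion.
import Mathlib
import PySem

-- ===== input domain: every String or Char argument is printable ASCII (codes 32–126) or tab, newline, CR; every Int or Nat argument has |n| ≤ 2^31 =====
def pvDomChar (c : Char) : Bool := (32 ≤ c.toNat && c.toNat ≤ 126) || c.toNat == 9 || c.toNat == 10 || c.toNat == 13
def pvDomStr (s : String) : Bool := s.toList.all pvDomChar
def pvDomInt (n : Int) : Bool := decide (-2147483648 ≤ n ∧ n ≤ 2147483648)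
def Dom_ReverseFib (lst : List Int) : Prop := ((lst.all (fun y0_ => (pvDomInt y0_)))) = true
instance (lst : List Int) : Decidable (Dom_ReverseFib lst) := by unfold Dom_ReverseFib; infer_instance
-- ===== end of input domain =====

-- B replaces the index loop with its parity test by a two-at-a-time structural recursion; same cost.

-- ===== PORT A =====
-- for i in range(len(lst)): if i%2==0: append(lst[i]*(-1)) else: append(lst[i])
def ReverseFib (lst : List Int) : List Int :=
  (PySem.List.pyRange 0 lst.length 1).foldl
    (fun acc i =>
      if PySem.Int.mod i 2 = 0 then acc ++ [(PySem.List.pyGetD lst i 0) * (-1)]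
      else acc ++ [PySem.List.pyGetD lst i 0]) []

-- ===== PORT B =====
def ReverseFib_alt (lst : List Int) : List Int :=
  match lst with
  | [] => []
  | [a] => [a * (-1)]
  | a :: b :: t => a * (-1) :: b :: ReverseFib_alt t

-- ===== PRECONDITION & SPEC =====
def Spec_ReverseFib (lst : List Int) (out : List Int) : Prop := out = ReverseFib_alt lst
instance (lst : List Int) (out : List Int) : Decidable (Spec_ReverseFib lst out) := by unfold Spec_ReverseFib; infer_instance

-- ===== CLAIM (what is proved, stated in full; the proofs are below) =====
def Claim_equal_ReverseFib : Prop := ∀ (lst : List Int), Dom_ReverseFib lst → Spec_ReverseFib lst (ReverseFib lst)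

-- ===== LEMMAS AND PROOFS =====

theorem alt_length (lst : List Int) : (ReverseFib_alt lst).length = lst.length := by
  fun_induction ReverseFib_alt lst <;> simp [*]

theorem alt_getElem (lst : List Int) (k : Nat) (h : k < lst.length)
    (h2 : k < (ReverseFib_alt lst).length) :
    (ReverseFib_alt lst)[k] = if k % 2 = 0 then lst[k] * (-1) else lst[k] := by
  fun_induction ReverseFib_alt lst generalizing k
  case case1 => simp at h
  case case2 a =>
    match k with
    | 0 => simp
  case case3 a b t ih =>
    match k with
    | 0 => simp
    | 1 => simp
    | k + 2 =>
      have hk : k < t.length := by simpa using h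
      have hk2 : k < (ReverseFib_alt t).length := by rw [alt_length]; exact hk
      have : (k + 2) % 2 = k % 2 := by omega
      simp only [List.getElem_cons_succ, this]
      rw [ih k hk hk2]

theorem a_eq_map (lst : List Int) :
    ReverseFib lst =
      (PySem.List.pyRange 0 lst.length 1).map
        (fun i => if PySem.Int.mod i 2 = 0 then (PySem.List.pyGetD lst i 0) * (-1)
                  else PySem.List.pyGetD lst i 0) := by
  unfold ReverseFib
  have hfun : (fun (acc : List Int) i =>
      if PySem.Int.mod i 2 = 0 then acc ++ [(PySem.List.pyGetD lst i 0) * (-1)]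
      else acc ++ [PySem.List.pyGetD lst i 0]) =
      (fun acc i => acc ++ [if PySem.Int.mod i 2 = 0 then (PySem.List.pyGetD lst i 0) * (-1)
                            else PySem.List.pyGetD lst i 0]) := by
    funext acc i; split <;> rfl
  rw [hfun, PySem.List.foldl_append_singleton_eq_map]
  simp

theorem mod_cast_two (k : Nat) : PySem.Int.mod (k : Int) 2 = ((k % 2 : Nat) : Int) := by
  simp [PySem.Int.mod, Int.fmod_eq_emod]

theorem ReverseFib_spec : Claim_equal_ReverseFib := by
  intro lst _
  unfold Spec_ReverseFib
  rw [a_eq_map]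
  apply List.ext_getElem
  · simp [alt_length, PySem.List.length_pyRange_one]
  · intro k h1 h2
    have hk : k < lst.length := by
      simpa [PySem.List.length_pyRange_one] using h1
    have hkr : k < (PySem.List.pyRange 0 (lst.length : Int) 1).length := by
      simpa [PySem.List.length_pyRange_one] using hk
    rw [List.getElem_map]
    rw [alt_getElem lst k hk h2]
    have hidx : (PySem.List.pyRange 0 (lst.length : Int) 1)[k] = (k : Int) := by
      rw [PySem.List.getElem_pyRange_one]; ring
    rw [hidx, mod_cast_two]
    have hget : PySem.List.pyGetD lst (k : Int) 0 = lst[k] := by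
      rw [PySem.List.pyGetD_natCast]; exact List.getD_eq_getElem lst 0 hk
    rw [hget]
    by_cases hp : k % 2 = 0
    · simp [hp]
    · have h0 : ¬ ((k % 2 : Nat) : Int) = 0 := by
        exact_mod_cast hp
      rw [if_neg h0, if_neg hp]
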